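-- pv_equiv track=rewrite | github.com/wirabinz/BearingPadStreamlit | engine.py | generate_base_configs
-- ===== SOURCE A (Python) =====
-- def generate_base_configs(a, b, target_Tb):
--     """Generates valid physical combinations of n, ti, ts using n+1 plate rule."""
--     covers = 5        # 2.5mm top + 2.5mm bottom
--     edge_cover = 4
--     valid_ts = {3, 4, 5}
--
--     a_prime = a - (2 * edge_cover)
--     b_prime = b - (2 * edge_cover)
--     A1 = a_prime * b_prime
--     lp = 2 * (a_prime + b_prime)
--
--     base_matches = []
--     for n in range(2, 12):
--         for ti in range(5, 25):
--             # T_b = (n * ti) + ((n + 1) * ts) + covers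
--             remaining = target_Tb - covers - (n * ti)
--
--             # Logic Update: n elastomer layers need n+1 plates for external plate config
--             denominator = n + 1
--
--             if remaining <= 0: continue # Check other n values
--
--             if remaining % denominator == 0:
--                 ts = remaining // denominator
--                 if ts in valid_ts:
--                     base_matches.append({
--                         "n": n, "ti": ti, "ts": ts,
--                         "a_prime": a_prime, "b_prime": b_prime,
--                         "A1": A1, "lp": lp, "T_b": target_Tb
--                     })
--     return base_matches
-- ===== SOURCE B (Python) =====
-- def generate_base_configs(a, b, target_Tb):
--     """Solves the layer equation n*ti + (n+1)*ts = target_Tb - covers for ti,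
--     in two staged comprehensions (candidates, then filter) instead of scanning ti."""
--     covers = 5
--     edge_cover = 4
--     a_prime = a - 2 * edge_cover
--     b_prime = b - 2 * edge_cover
--     A1 = a_prime * b_prime
--     lp = 2 * (a_prime + b_prime)
--     S = target_Tb - covers
--     # stage 1: all algebraic candidates (n, ti quotient, remainder, ts); ts descending so ti ascends within each n
--     cands = [(n, (S - (n + 1) * ts) // n, (S - (n + 1) * ts) % n, ts)
--              for n in range(2, 12) for ts in (5, 4, 3)]
--     # stage 2: keep exact divisions whose ti lies in the physical range
--     return [{"n": n, "ti": q, "ts": ts, "a_prime": a_prime, "b_prime": b_prime,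
--              "A1": A1, "lp": lp, "T_b": target_Tb}
--             for (n, q, r, ts) in cands if r == 0 and 5 <= q <= 24]
-- ===== Notes on version B (the rewrite author's own statement) =====
-- stated objective: faster
-- what changed: Instead of an accumulator loop scanning all 20 ti values per n and testing divisibility of the remainder by n+1, B solves n*ti + (n+1)*ts = target_Tb - covers for ti: a first comprehension builds the 30 algebraic candidates (n, ti-quotient, remainder, ts) with ts descending so matches keep A's ascending-ti order, and a second comprehension keeps exact divisions with ti in 5..24.
import Mathlib
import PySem

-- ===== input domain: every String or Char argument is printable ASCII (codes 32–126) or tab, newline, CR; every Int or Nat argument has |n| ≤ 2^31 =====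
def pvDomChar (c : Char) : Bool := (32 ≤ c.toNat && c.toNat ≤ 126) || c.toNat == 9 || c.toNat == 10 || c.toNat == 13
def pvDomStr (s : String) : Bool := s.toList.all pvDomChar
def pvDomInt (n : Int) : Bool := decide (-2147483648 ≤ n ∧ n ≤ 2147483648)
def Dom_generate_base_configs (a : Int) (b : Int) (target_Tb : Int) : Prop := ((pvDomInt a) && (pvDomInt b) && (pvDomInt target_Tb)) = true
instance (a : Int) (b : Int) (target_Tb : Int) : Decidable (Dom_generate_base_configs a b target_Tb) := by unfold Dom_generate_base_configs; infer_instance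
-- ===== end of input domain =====

-- B solves n*ti + (n+1)*ts = target_Tb - covers for ti in two staged comprehensions (candidates, then filter) instead of A's accumulator loop scanning all ti; same outputs, same order.

-- ===== PORT A =====
def generate_base_configs (a : Int) (b : Int) (target_Tb : Int) : List (List (String × Int)) :=
  let covers : Int := 5
  let edge_cover : Int := 4
  let valid_ts : PySem.Set Int := PySem.Set.ofList [3, 4, 5]
  let a_prime := a - (2 * edge_cover)
  let b_prime := b - (2 * edge_cover)
  let A1 := a_prime * b_prime
  let lp := 2 * (a_prime + b_prime)
  (PySem.List.pyRange 2 12 1).foldl (fun base_matches n =>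
    (PySem.List.pyRange 5 25 1).foldl (fun base_matches ti =>
      let remaining := target_Tb - covers - (n * ti)
      let denominator := n + 1
      if remaining ≤ 0 then base_matches
      else if PySem.Int.mod remaining denominator == 0 then
        let ts := PySem.Int.floordiv remaining denominator
        if PySem.Set.contains valid_ts ts then
          base_matches ++ [[("n", n), ("ti", ti), ("ts", ts),
            ("a_prime", a_prime), ("b_prime", b_prime),
            ("A1", A1), ("lp", lp), ("T_b", target_Tb)]]
        else base_matches
      else base_matches) base_matches) []

-- ===== PORT B =====
def generate_base_configs_alt (a : Int) (b : Int) (target_Tb : Int) : List (List (String × Int)) :=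
  let covers : Int := 5
  let edge_cover : Int := 4
  let a_prime := a - 2 * edge_cover
  let b_prime := b - 2 * edge_cover
  let A1 := a_prime * b_prime
  let lp := 2 * (a_prime + b_prime)
  let S := target_Tb - covers
  -- stage 1: the 30 algebraic candidates (n, ti quotient, remainder, ts)
  let cands : List (Int × Int × Int × Int) :=
    (PySem.List.pyRange 2 12 1).flatMap (fun n =>
      ([5, 4, 3] : List Int).map (fun ts =>
        (n, PySem.Int.floordiv (S - (n + 1) * ts) n, PySem.Int.mod (S - (n + 1) * ts) n, ts)))
  -- stage 2: keep exact divisions whose ti lies in the physical range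
  cands.filterMap (fun x =>
    if x.2.2.1 == 0 ∧ 5 ≤ x.2.1 ∧ x.2.1 ≤ 24 then
      some [("n", x.1), ("ti", x.2.1), ("ts", x.2.2.2),
        ("a_prime", a_prime), ("b_prime", b_prime),
        ("A1", A1), ("lp", lp), ("T_b", target_Tb)]
    else none)

-- ===== PRECONDITION & SPEC =====
def Spec_generate_base_configs (a : Int) (b : Int) (target_Tb : Int) (out : List (List (String × Int))) : Prop := out = generate_base_configs_alt a b target_Tb
instance (a : Int) (b : Int) (target_Tb : Int) (out : List (List (String × Int))) : Decidable (Spec_generate_base_configs a b target_Tb out) := by unfold Spec_generate_base_configs; infer_instance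

-- ===== CLAIM (what is proved, stated in full; the proofs are below) =====
def Claim_equal_generate_base_configs : Prop := ∀ (a : Int) (b : Int) (target_Tb : Int), Dom_generate_base_configs a b target_Tb → Spec_generate_base_configs a b target_Tb (generate_base_configs a b target_Tb)

-- ===== LEMMAS AND PROOFS =====

/-- The (ti, ts) pairs A's inner loop accepts for a given n, in A's order. -/
def pvPA (T n ti : Int) : Bool :=
  (!decide (T - 5 - n * ti ≤ 0)) &&
  (PySem.Int.mod (T - 5 - n * ti) (n + 1) == 0) &&
  PySem.Set.contains (PySem.Set.ofList [3, 4, 5]) (PySem.Int.floordiv (T - 5 - n * ti) (n + 1))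

def pvSelA (T n : Int) : List (Int × Int) :=
  ((PySem.List.pyRange 5 25 1).filter (pvPA T n)).map
    (fun ti => (ti, PySem.Int.floordiv (T - 5 - n * ti) (n + 1)))

/-- The (ti, ts) pairs B's staged pipeline accepts for a given n, in B's order. -/
def pvSelB (T n : Int) : List (Int × Int) :=
  ([5, 4, 3] : List Int).filterMap (fun ts =>
    if PySem.Int.mod (T - 5 - (n + 1) * ts) n == 0 ∧
       5 ≤ PySem.Int.floordiv (T - 5 - (n + 1) * ts) n ∧
       PySem.Int.floordiv (T - 5 - (n + 1) * ts) n ≤ 24 then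
      some (PySem.Int.floordiv (T - 5 - (n + 1) * ts) n, ts)
    else none)

def pvEntry (a b T n ti ts : Int) : List (String × Int) :=
  [("n", n), ("ti", ti), ("ts", ts),
   ("a_prime", a - (2 * 4)), ("b_prime", b - (2 * 4)),
   ("A1", (a - (2 * 4)) * (b - (2 * 4))), ("lp", 2 * ((a - (2 * 4)) + (b - (2 * 4)))), ("T_b", T)]

lemma pvA_shape (a b T : Int) :
    generate_base_configs a b T =
      (PySem.List.pyRange 2 12 1).flatMap (fun n =>
        (pvSelA T n).map (fun p => pvEntry a b T n p.1 p.2)) := by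
  simp only [generate_base_configs]
  have hinner : ∀ (n : Int) (acc : List (List (String × Int))),
      (PySem.List.pyRange 5 25 1).foldl (fun base_matches ti =>
        let remaining := T - 5 - (n * ti)
        let denominator := n + 1
        if remaining ≤ 0 then base_matches
        else if PySem.Int.mod remaining denominator == 0 then
          let ts := PySem.Int.floordiv remaining denominator
          if PySem.Set.contains (PySem.Set.ofList [3, 4, 5]) ts then
            base_matches ++ [[("n", n), ("ti", ti), ("ts", ts),
              ("a_prime", a - (2 * 4)), ("b_prime", b - (2 * 4)),
              ("A1", (a - (2 * 4)) * (b - (2 * 4))), ("lp", 2 * ((a - (2 * 4)) + (b - (2 * 4)))), ("T_b", T)]]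
          else base_matches
        else base_matches) acc
      = acc ++ (pvSelA T n).map (fun p => pvEntry a b T n p.1 p.2) := by
    intro n acc
    have hfun : (fun (base_matches : List (List (String × Int))) (ti : Int) =>
        let remaining := T - 5 - (n * ti)
        let denominator := n + 1
        if remaining ≤ 0 then base_matches
        else if PySem.Int.mod remaining denominator == 0 then
          let ts := PySem.Int.floordiv remaining denominator
          if PySem.Set.contains (PySem.Set.ofList [3, 4, 5]) ts then
            base_matches ++ [[("n", n), ("ti", ti), ("ts", ts),
              ("a_prime", a - (2 * 4)), ("b_prime", b - (2 * 4)),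
              ("A1", (a - (2 * 4)) * (b - (2 * 4))), ("lp", 2 * ((a - (2 * 4)) + (b - (2 * 4)))), ("T_b", T)]]
          else base_matches
        else base_matches)
        = (fun base_matches ti =>
            if pvPA T n ti then base_matches ++
              [pvEntry a b T n ti (PySem.Int.floordiv (T - 5 - n * ti) (n + 1))]
            else base_matches) := by
      funext acc ti
      by_cases h1 : T - 5 - n * ti ≤ 0 <;>
        by_cases h2 : PySem.Int.mod (T - 5 - n * ti) (n + 1) == 0 <;>
        by_cases h3 : PySem.Set.contains (PySem.Set.ofList [3, 4, 5])
            (PySem.Int.floordiv (T - 5 - n * ti) (n + 1)) = true <;>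
        simp [pvPA, pvEntry, h1, h2]
    rw [hfun, PySem.List.foldl_append_if]
    simp [pvSelA, List.map_map, Function.comp]
  have houter : (fun (base_matches : List (List (String × Int))) (n : Int) =>
      (PySem.List.pyRange 5 25 1).foldl (fun base_matches ti =>
        let remaining := T - 5 - (n * ti)
        let denominator := n + 1
        if remaining ≤ 0 then base_matches
        else if PySem.Int.mod remaining denominator == 0 then
          let ts := PySem.Int.floordiv remaining denominator
          if PySem.Set.contains (PySem.Set.ofList [3, 4, 5]) ts then
            base_matches ++ [[("n", n), ("ti", ti), ("ts", ts),
              ("a_prime", a - (2 * 4)), ("b_prime", b - (2 * 4)),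
              ("A1", (a - (2 * 4)) * (b - (2 * 4))), ("lp", 2 * ((a - (2 * 4)) + (b - (2 * 4)))), ("T_b", T)]]
          else base_matches
        else base_matches) base_matches)
      = (fun acc n => acc ++ (pvSelA T n).map (fun p => pvEntry a b T n p.1 p.2)) := by
    funext acc n; exact hinner n acc
  rw [houter, PySem.List.foldl_append_eq_flatMap]
  simp

lemma pvB_shape (a b T : Int) :
    generate_base_configs_alt a b T =
      (PySem.List.pyRange 2 12 1).flatMap (fun n =>
        (pvSelB T n).map (fun p => pvEntry a b T n p.1 p.2)) := by
  simp only [generate_base_configs_alt, List.filterMap_flatMap]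
  refine List.flatMap_congr (fun n _ => ?_)
  simp only [pvSelB, List.filterMap_map, List.map_filterMap, Function.comp]
  refine List.filterMap_congr (fun ts _ => ?_)
  by_cases h : PySem.Int.mod (T - 5 - (n + 1) * ts) n == 0 ∧
       5 ≤ PySem.Int.floordiv (T - 5 - (n + 1) * ts) n ∧
       PySem.Int.floordiv (T - 5 - (n + 1) * ts) n ≤ 24 <;>
    simp [pvEntry, h]

lemma pvPairA (T n : Int) : (pvSelA T n).Pairwise (fun p q => p.1 < q.1) := by
  unfold pvSelA
  rw [List.pairwise_map]
  exact List.Pairwise.filter _ (PySem.List.pairwise_lt_pyRange_one 5 25)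

lemma pvKeyDivLt {n X Y : Int} (hn : 0 < n) (hX : X % n = 0) (hY : Y % n = 0)
    (hlt : X < Y) : X / n < Y / n := by
  obtain ⟨x, rfl⟩ := Int.dvd_of_emod_eq_zero hX
  obtain ⟨y, rfl⟩ := Int.dvd_of_emod_eq_zero hY
  rw [Int.mul_ediv_cancel_left _ (by omega), Int.mul_ediv_cancel_left _ (by omega)]
  exact lt_of_mul_lt_mul_left hlt hn.le

lemma pvPairB (T n : Int) (h2 : 2 ≤ n) (h12 : n < 12) :
    (pvSelB T n).Pairwise (fun p q => p.1 < q.1) := by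
  have hn : (0 : Int) < n := by omega
  unfold pvSelB
  simp only [PySem.Int.floordiv_eq_ediv_of_pos hn, PySem.Int.mod_eq_emod_of_pos hn, beq_iff_eq,
    List.filterMap_cons, List.filterMap_nil]
  split_ifs with c5 c4 c3 c3x c4x c3y c3z
  · refine List.Pairwise.cons (fun p hp => ?_)
      (List.Pairwise.cons (fun p hp => ?_) (List.pairwise_singleton _ _))
    · simp only [List.mem_cons, List.not_mem_nil, or_false] at hp
      rcases hp with rfl | rfl
      · exact pvKeyDivLt hn c5.1 c4.1 (by omega)
      · exact pvKeyDivLt hn c5.1 c3.1 (by omega)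
    · simp only [List.mem_cons, List.not_mem_nil, or_false] at hp
      rcases hp with rfl
      exact pvKeyDivLt hn c4.1 c3.1 (by omega)
  · refine List.Pairwise.cons (fun p hp => ?_) (List.pairwise_singleton _ _)
    simp only [List.mem_cons, List.not_mem_nil, or_false] at hp
    rcases hp with rfl
    exact pvKeyDivLt hn c5.1 c4.1 (by omega)
  · refine List.Pairwise.cons (fun p hp => ?_) (List.pairwise_singleton _ _)
    simp only [List.mem_cons, List.not_mem_nil, or_false] at hp
    rcases hp with rfl
    exact pvKeyDivLt hn c5.1 c3x.1 (by omega)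
  · exact List.pairwise_singleton _ _
  · refine List.Pairwise.cons (fun p hp => ?_) (List.pairwise_singleton _ _)
    simp only [List.mem_cons, List.not_mem_nil, or_false] at hp
    rcases hp with rfl
    exact pvKeyDivLt hn c4x.1 c3y.1 (by omega)
  · exact List.pairwise_singleton _ _
  · exact List.pairwise_singleton _ _
  · exact List.Pairwise.nil

lemma pvMem_iff (T n : Int) (h2 : 2 ≤ n) (h12 : n < 12) (p : Int × Int) :
    p ∈ pvSelA T n ↔ p ∈ pvSelB T n := by
  obtain ⟨x, y⟩ := p
  have hn : (0 : Int) < n := by omega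
  have hn1 : (0 : Int) < n + 1 := by omega
  constructor
  · intro h
    obtain ⟨ti, hfil, heq⟩ := List.mem_map.mp h
    obtain ⟨hx, hy⟩ := Prod.mk.inj heq
    obtain ⟨hrange, hP⟩ := List.mem_filter.mp hfil
    obtain ⟨h5, h25⟩ := (PySem.List.mem_pyRange_one).mp hrange
    unfold pvPA at hP
    rw [Bool.and_eq_true, Bool.and_eq_true] at hP
    obtain ⟨⟨hpos, hmod⟩, hset⟩ := hP
    rw [beq_iff_eq, PySem.Int.mod_eq_emod_of_pos hn1] at hmod
    rw [PySem.Set.contains_iff] at hset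
    simp only [PySem.Set.mem_ofList, List.mem_cons, List.not_mem_nil, or_false,
      PySem.Int.floordiv_eq_ediv_of_pos hn1] at hset
    obtain ⟨k, hk⟩ := Int.dvd_of_emod_eq_zero hmod
    have hq : (T - 5 - n * ti) / (n + 1) = k := by
      rw [hk]; exact Int.mul_ediv_cancel_left _ (by omega)
    rw [hq] at hset
    have hnk : T - 5 - (n + 1) * k = n * ti := by linear_combination hk
    refine List.mem_filterMap.mpr ⟨k, ?_, ?_⟩
    · rcases hset with rfl | rfl | rfl <;> simp
    · have hcond : (PySem.Int.mod (T - 5 - (n + 1) * k) n == 0) = true ∧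
          5 ≤ PySem.Int.floordiv (T - 5 - (n + 1) * k) n ∧
          PySem.Int.floordiv (T - 5 - (n + 1) * k) n ≤ 24 := by
        rw [beq_iff_eq, PySem.Int.mod_eq_emod_of_pos hn, PySem.Int.floordiv_eq_ediv_of_pos hn,
          hnk, Int.mul_emod_right, Int.mul_ediv_cancel_left _ (by omega)]
        exact ⟨rfl, h5, by omega⟩
      rw [if_pos hcond]
      have hdiv : PySem.Int.floordiv (T - 5 - (n + 1) * k) n = ti := by
        rw [PySem.Int.floordiv_eq_ediv_of_pos hn, hnk]
        exact Int.mul_ediv_cancel_left _ (by omega)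
      rw [PySem.Int.floordiv_eq_ediv_of_pos hn1, hq] at hy
      rw [hdiv, hx, hy]
  · intro h
    obtain ⟨ts, hts, heq⟩ := List.mem_filterMap.mp h
    simp only [List.mem_cons, List.not_mem_nil, or_false] at hts
    by_cases hcond : (PySem.Int.mod (T - 5 - (n + 1) * ts) n == 0) = true ∧
        5 ≤ PySem.Int.floordiv (T - 5 - (n + 1) * ts) n ∧
        PySem.Int.floordiv (T - 5 - (n + 1) * ts) n ≤ 24
    swap
    · rw [if_neg hcond] at heq; exact absurd heq (by simp)
    obtain ⟨hmod, hlo, hhi⟩ := hcond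
    rw [if_pos ⟨hmod, hlo, hhi⟩] at heq
    obtain ⟨hx, hy⟩ := Prod.mk.inj (Option.some.inj heq)
    rw [beq_iff_eq, PySem.Int.mod_eq_emod_of_pos hn] at hmod
    rw [PySem.Int.floordiv_eq_ediv_of_pos hn] at hlo hhi hx
    obtain ⟨k, hk⟩ := Int.dvd_of_emod_eq_zero hmod
    have hq : (T - 5 - (n + 1) * ts) / n = k := by
      rw [hk]; exact Int.mul_ediv_cancel_left _ (by omega)
    rw [hq] at hlo hhi hx
    have hnk : T - 5 - n * k = (n + 1) * ts := by linear_combination hk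
    have hE : (T - 5 - n * k) / (n + 1) = ts := by
      rw [hnk]; exact Int.mul_ediv_cancel_left _ (by omega)
    refine List.mem_map.mpr ⟨k, List.mem_filter.mpr ⟨?_, ?_⟩, ?_⟩
    · exact PySem.List.mem_pyRange_one.mpr ⟨hlo, by omega⟩
    · unfold pvPA
      rw [Bool.and_eq_true, Bool.and_eq_true]
      refine ⟨⟨?_, ?_⟩, ?_⟩
      · simp only [Bool.not_eq_true', decide_eq_false_iff_not, not_le]
        rw [hnk]
        rcases hts with rfl | rfl | rfl <;> omega
      · rw [beq_iff_eq, PySem.Int.mod_eq_emod_of_pos hn1, hnk]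
        exact Int.mul_emod_right _ _
      · rw [PySem.Set.contains_iff]
        simp only [PySem.Set.mem_ofList, List.mem_cons, List.not_mem_nil, or_false,
          PySem.Int.floordiv_eq_ediv_of_pos hn1, hE]
        tauto
    · rw [PySem.Int.floordiv_eq_ediv_of_pos hn1, hE, hx, hy]

lemma pvNodupA (T n : Int) : (pvSelA T n).Nodup :=
  (pvPairA T n).imp (fun h heq => by rw [heq] at h; exact lt_irrefl _ h)

lemma pvNodupB (T n : Int) (h2 : 2 ≤ n) (h12 : n < 12) : (pvSelB T n).Nodup :=
  (pvPairB T n h2 h12).imp (fun h heq => by rw [heq] at h; exact lt_irrefl _ h)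

lemma pvSel_eq (T n : Int) (hn : n ∈ PySem.List.pyRange 2 12 1) : pvSelA T n = pvSelB T n := by
  rw [PySem.List.mem_pyRange_one] at hn
  obtain ⟨h2, h12⟩ := hn
  exact List.Perm.eq_of_pairwise
    (fun a b _ _ hab hba => absurd (hab.trans hba) (lt_irrefl _))
    (pvPairA T n) (pvPairB T n h2 h12)
    ((List.perm_ext_iff_of_nodup (pvNodupA T n) (pvNodupB T n h2 h12)).mpr (pvMem_iff T n h2 h12))

-- ===== VERDICT (by name: the statement is the Claim_ definition above) =====
theorem generate_base_configs_spec : Claim_equal_generate_base_configs := by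
  intro a b T _
  unfold Spec_generate_base_configs
  rw [pvA_shape, pvB_shape]
  exact List.flatMap_congr (fun n hn => by rw [pvSel_eq T n hn])
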